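-- pv_equiv track=rewrite | github.com/sarmiena/NIM-LLab | lib/nim_selector.py | extract_and_sort_versions
-- ===== SOURCE A (Python) =====
-- from typing import List, Dict, Any
--
-- def extract_and_sort_versions(nim_info: Dict[str, Any]) -> List[str]:
--     """Extract tags, remove 'latest', and sort versions."""
--     tags = nim_info.get('tags', [])
--
--     # Remove 'latest' from the list
--     filtered_tags = [tag for tag in tags if tag != 'latest']
--
--     # Sort versions - put numeric versions first, then others
--     def version_sort_key(version: str) -> tuple:
--         try:
--             # Try to parse as version numbers (e.g., "1.12.0" -> [1, 12, 0])
--             parts = [int(x) for x in version.split('.')]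
--             return (0, parts)  # 0 for numeric versions (higher priority)
--         except ValueError:
--             # For non-numeric versions, sort alphabetically
--             return (1, version)  # 1 for non-numeric versions (lower priority)
--
--     sorted_tags = sorted(filtered_tags, key=version_sort_key, reverse=True)
--     return sorted_tags
-- ===== SOURCE B (Python) =====
-- from typing import List, Dict, Any
--
-- def extract_and_sort_versions(nim_info: Dict[str, Any]) -> List[str]:
--     """One pass partitions tags (minus 'latest') into numeric and non-numeric
--     buckets; each bucket is sorted descending on its own key and the buckets
--     are concatenated (non-numeric first, matching (1,...) > (0,...))."""
--     numeric = []   # (parts, tag) pairs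
--     others = []
--     for tag in nim_info.get('tags', []):
--         if tag == 'latest':
--             continue
--         try:
--             parts = [int(x) for x in tag.split('.')]
--             numeric.append((parts, tag))
--         except ValueError:
--             others.append(tag)
--     others.sort(reverse=True)
--     numeric.sort(key=lambda pt: pt[0], reverse=True)
--     return others + [tag for _, tag in numeric]
-- ===== Notes on version B (the rewrite author's own statement) =====
-- stated objective: alternative
-- what changed: Instead of one sort of the whole list under a composite (priority, key) tuple, B partitions tags in a single pass into numeric and non-numeric buckets, sorts each bucket independently under its own simple key, and concatenates them.
import Mathlib
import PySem

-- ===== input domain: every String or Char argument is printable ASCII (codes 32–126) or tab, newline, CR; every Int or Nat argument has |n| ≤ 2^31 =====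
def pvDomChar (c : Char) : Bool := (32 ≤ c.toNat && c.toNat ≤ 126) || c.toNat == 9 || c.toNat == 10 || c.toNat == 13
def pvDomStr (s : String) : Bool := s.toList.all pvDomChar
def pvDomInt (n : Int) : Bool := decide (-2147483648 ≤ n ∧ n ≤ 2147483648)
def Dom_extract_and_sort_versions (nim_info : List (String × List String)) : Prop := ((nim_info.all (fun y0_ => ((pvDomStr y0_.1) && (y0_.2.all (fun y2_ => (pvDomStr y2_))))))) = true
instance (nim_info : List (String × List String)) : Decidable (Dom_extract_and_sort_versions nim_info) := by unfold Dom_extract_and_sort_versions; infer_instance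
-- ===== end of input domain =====

-- B partitions tags into numeric / non-numeric buckets in one pass and sorts each bucket
-- under its own simple key instead of one sort under a composite tuple key (objective: alternative).


-- ===== PORT A =====
-- shared helper (both Pythons run the identical parse: [int(x) for x in version.split('.')])
def parseVersion (s : String) : Option (List Int) :=
  (PySem.Chars.splitOn s.toList ['.']).mapM PySem.Int.ofChars?

-- A's key (0, parts) / (1, version): Lean's '<' on pairs is not Python's lexicographic tuple
-- order, so the tuple is encoded order-faithfully into List Int (0::parts, 1::char codes);
-- List Int carries exactly the lexicographic order Python uses on int lists and strings.
def versionSortKey (version : String) : List Int :=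
  match parseVersion version with
  | some parts => 0 :: parts
  | none => 1 :: version.toList.map (fun c => (c.toNat : Int))

def extract_and_sort_versions (nim_info : List (String × List String)) : List String :=
  let tags := PySem.Dict.getD ⟨nim_info⟩ "tags" []
  let filtered_tags := tags.filter (fun tag => tag ≠ "latest")
  PySem.List.sorted filtered_tags versionSortKey true

-- ===== PORT B =====
def extract_and_sort_versions_alt (nim_info : List (String × List String)) : List String :=
  let tags := PySem.Dict.getD ⟨nim_info⟩ "tags" []
  let p := tags.foldl (fun (acc : List String × List (List Int × String)) tag =>
    if tag = "latest" then acc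
    else match parseVersion tag with
      | some parts => (acc.1, acc.2 ++ [(parts, tag)])
      | none => (acc.1 ++ [tag], acc.2)) ([], [])
  PySem.List.sorted p.1 (fun s => s) true
    ++ (PySem.List.sorted p.2 (fun pt => pt.1) true).map (fun pt => pt.2)

-- ===== PRECONDITION & SPEC =====
def Spec_extract_and_sort_versions (nim_info : List (String × List String)) (out : List String) : Prop := out = extract_and_sort_versions_alt nim_info
instance (nim_info : List (String × List String)) (out : List String) : Decidable (Spec_extract_and_sort_versions nim_info out) := by unfold Spec_extract_and_sort_versions; infer_instance

-- ===== CLAIM (what is proved, stated in full; the proofs are below) =====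
def Claim_equal_extract_and_sort_versions : Prop := ∀ (nim_info : List (String × List String)), Dom_extract_and_sort_versions nim_info → Spec_extract_and_sort_versions nim_info (extract_and_sort_versions nim_info)

-- ===== LEMMAS AND PROOFS =====

-- snoc step of insertion sort (reverse=True)
theorem sorted_rev_snoc {α κ : Type} [LT κ] [DecidableLT κ] (xs : List α) (x : α) (key : α → κ) :
    PySem.List.sorted (xs ++ [x]) key true
      = PySem.List.insertBy (fun a b => decide (key b < key a)) x (PySem.List.sorted xs key true) := by
  rw [PySem.List.sorted_rev_eq_foldl_insertBy, PySem.List.sorted_rev_eq_foldl_insertBy,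
    List.foldl_append]
  rfl

theorem insertBy_congr {α : Type} (p q : α → α → Bool) (x : α) (ys : List α)
    (h : ∀ y ∈ ys, p x y = q x y) :
    PySem.List.insertBy p x ys = PySem.List.insertBy q x ys := by
  induction ys with
  | nil => rfl
  | cons y ys ih =>
    simp only [PySem.List.insertBy, h y (by simp)]
    split
    · rfl
    · rw [ih (fun z hz => h z (by simp [hz]))]

theorem insertBy_append_right {α : Type} (p : α → α → Bool) (x : α) (A B : List α)
    (hB : ∀ b ∈ B, p x b = true) :
    PySem.List.insertBy p x (A ++ B) = PySem.List.insertBy p x A ++ B := by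
  induction A with
  | nil =>
    cases B with
    | nil => rfl
    | cons b bs => simp [PySem.List.insertBy, hB b (by simp)]
  | cons a as ih =>
    simp only [List.cons_append, PySem.List.insertBy]
    split <;> simp [ih]

theorem insertBy_append_left {α : Type} (p : α → α → Bool) (x : α) (A B : List α)
    (hA : ∀ a ∈ A, p x a = false) :
    PySem.List.insertBy p x (A ++ B) = A ++ PySem.List.insertBy p x B := by
  induction A with
  | nil => rfl
  | cons a as ih =>
    simp only [List.cons_append, PySem.List.insertBy, hA a (by simp)]
    simp [ih (fun z hz => hA z (by simp [hz]))]

theorem map_snd_insertBy (p : (List Int × String) → (List Int × String) → Bool)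
    (q : String → String → Bool) (x : List Int × String) (L : List (List Int × String))
    (h : ∀ y ∈ L, p x y = q x.2 y.2) :
    (PySem.List.insertBy p x L).map (fun pt => pt.2)
      = PySem.List.insertBy q x.2 (L.map (fun pt => pt.2)) := by
  induction L with
  | nil => rfl
  | cons y ys ih =>
    simp only [PySem.List.insertBy, List.map_cons, h y (by simp)]
    split
    · rfl
    · simp [ih (fun z hz => h z (by simp [hz]))]

-- character-code encoding is order-faithful
theorem codes_lt_iff (u v : List Char) :
    (u.map (fun c => (c.toNat : Int)) < v.map (fun c => (c.toNat : Int))) ↔ u < v := by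
  induction u generalizing v with
  | nil => cases v <;> simp [List.nil_lt_cons]
  | cons a as ih =>
    cases v with
    | nil => simp
    | cons b bs =>
      simp only [List.map_cons, List.cons_lt_cons_iff, ih]
      constructor
      · rintro (h | ⟨h, h2⟩)
        · exact Or.inl (by rw [Char.lt_def, UInt32.lt_iff_toNat_lt]; exact_mod_cast h)
        · exact Or.inr ⟨by apply Char.ext; apply UInt32.toNat.inj; exact_mod_cast h, h2⟩
      · rintro (h | ⟨h, h2⟩)
        · exact Or.inl (by rw [Char.lt_def, UInt32.lt_iff_toNat_lt] at h; exact_mod_cast h)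
        · exact Or.inr ⟨by rw [h], h2⟩

theorem str_key_lt_iff (a b : String) (ha : parseVersion a = none) (hb : parseVersion b = none) :
    (versionSortKey a < versionSortKey b) ↔ a < b := by
  simp only [versionSortKey, ha, hb, List.cons_lt_cons_iff, codes_lt_iff, ← String.lt_iff_toList_lt]
  constructor
  · rintro (h | ⟨-, h⟩)
    · exact absurd h (lt_irrefl _)
    · exact h
  · intro h; exact Or.inr ⟨by norm_num, h⟩

theorem num_key_lt_iff (a b : String) (pa pb : List Int)
    (ha : parseVersion a = some pa) (hb : parseVersion b = some pb) :
    (versionSortKey a < versionSortKey b) ↔ pa < pb := by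
  simp only [versionSortKey, ha, hb, List.cons_lt_cons_iff]
  constructor
  · rintro (h | ⟨-, h⟩)
    · exact absurd h (lt_irrefl _)
    · exact h
  · intro h; exact Or.inr ⟨by norm_num, h⟩

theorem num_lt_str_key (a b : String) (pa : List Int)
    (ha : parseVersion a = some pa) (hb : parseVersion b = none) :
    versionSortKey a < versionSortKey b := by
  simp only [versionSortKey, ha, hb, List.cons_lt_cons_iff]
  exact Or.inl (by norm_num)

theorem str_not_lt_num (a b : String) (pa : List Int)
    (ha : parseVersion a = some pa) (hb : parseVersion b = none) :
    ¬ versionSortKey b < versionSortKey a := by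
  simp only [versionSortKey, ha, hb, List.cons_lt_cons_iff]
  rintro (h | ⟨h, -⟩) <;> norm_num at h

-- the partitions of a filtered tag list
def othersOf (ys : List String) : List String := ys.filter (fun t => (parseVersion t).isNone)
def numsOf (ys : List String) : List (List Int × String) :=
  ys.filterMap (fun t => (parseVersion t).map (fun ps => (ps, t)))

theorem mem_numsOf_parse {ys : List String} {pr : List Int × String} (h : pr ∈ numsOf ys) :
    parseVersion pr.2 = some pr.1 := by
  simp only [numsOf, List.mem_filterMap] at h
  obtain ⟨t, -, ht⟩ := h
  cases hp : parseVersion t with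
  | none => rw [hp] at ht; simp at ht
  | some ps =>
    rw [hp] at ht
    simp only [Option.map_some, Option.some.injEq] at ht
    subst ht; simpa using hp

theorem mem_othersOf_parse {ys : List String} {t : String} (h : t ∈ othersOf ys) :
    parseVersion t = none := by
  simp only [othersOf, List.mem_filter, Option.isNone_iff_eq_none] at h
  exact h.2

-- the heart: one reverse-sort under the composite key = concatenation of the two bucket sorts
theorem sorted_split (ys : List String) :
    PySem.List.sorted ys versionSortKey true
      = PySem.List.sorted (othersOf ys) (fun s => s) true
        ++ (PySem.List.sorted (numsOf ys) (fun pt => pt.1) true).map (fun pt => pt.2) := by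
  induction ys using List.reverseRecOn with
  | nil => rfl
  | append_singleton ys x ih =>
    rw [sorted_rev_snoc]
    rw [ih]
    cases hx : parseVersion x with
    | none =>
      have hO : othersOf (ys ++ [x]) = othersOf ys ++ [x] := by
        simp [othersOf, List.filter_append, hx]
      have hN : numsOf (ys ++ [x]) = numsOf ys := by
        simp [numsOf, List.filterMap_append, hx]
      rw [hO, hN, sorted_rev_snoc]
      rw [insertBy_append_right _ x _ _ (by
        intro b hb
        simp only [List.mem_map] at hb
        obtain ⟨pr, hpr, rfl⟩ := hb
        have := mem_numsOf_parse ((PySem.List.mem_sorted _ _ _ _).mp hpr)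
        simpa using num_lt_str_key _ _ _ this hx)]
      congr 1
      apply insertBy_congr
      intro y hy
      have hy' := mem_othersOf_parse ((PySem.List.mem_sorted _ _ _ _).mp hy)
      simp only [decide_eq_decide]
      exact str_key_lt_iff _ _ hy' hx
    | some ps =>
      have hO : othersOf (ys ++ [x]) = othersOf ys := by
        simp [othersOf, List.filter_append, hx]
      have hN : numsOf (ys ++ [x]) = numsOf ys ++ [(ps, x)] := by
        simp [numsOf, List.filterMap_append, hx]
      rw [hO, hN, sorted_rev_snoc]
      rw [insertBy_append_left _ x _ _ (by
        intro a ha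
        have ha' := mem_othersOf_parse ((PySem.List.mem_sorted _ _ _ _).mp ha)
        simp only [decide_eq_false_iff_not]
        exact str_not_lt_num _ _ _ hx ha')]
      congr 1
      rw [map_snd_insertBy (fun a b => decide (b.1 < a.1)) (fun a b => decide (versionSortKey b < versionSortKey a)) (ps, x) _ (by
        intro y hy
        have := mem_numsOf_parse ((PySem.List.mem_sorted _ _ _ _).mp hy)
        simp only [decide_eq_decide]
        exact (num_key_lt_iff _ _ _ _ this hx).symm)]

theorem fold_partition (tags : List String) (o : List String) (n : List (List Int × String)) :
    tags.foldl (fun (acc : List String × List (List Int × String)) tag =>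
      if tag = "latest" then acc
      else match parseVersion tag with
        | some parts => (acc.1, acc.2 ++ [(parts, tag)])
        | none => (acc.1 ++ [tag], acc.2)) (o, n)
    = (o ++ othersOf (tags.filter (fun t => t ≠ "latest")),
       n ++ numsOf (tags.filter (fun t => t ≠ "latest"))) := by
  induction tags generalizing o n with
  | nil => simp [othersOf, numsOf]
  | cons t ts ih =>
    simp only [List.foldl_cons, List.filter_cons]
    by_cases ht : t = "latest"
    · simp [ht, ih]
    · simp only [ht, ite_false]
      cases hp : parseVersion t with
      | none => simp [ih, othersOf, numsOf, hp, ht]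
      | some ps => simp [ih, othersOf, numsOf, hp, ht]

-- ===== VERDICT (by name: the statement is the Claim_ definition above) =====
theorem extract_and_sort_versions_spec : Claim_equal_extract_and_sort_versions := by
  intro nim_info _
  unfold Spec_extract_and_sort_versions extract_and_sort_versions extract_and_sort_versions_alt
  simp only
  rw [fold_partition, sorted_split]
  simp
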